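-- pv_equiv track=rewrite | github.com/achimdehnert/platform | _ARCHIVED/packages/sphinx-export/services.py | _parse_column_positions
-- ===== SOURCE A (Python) =====
-- from typing import Optional, List, Dict, Any, Tuple
--
-- def _parse_column_positions(separator: str) -> List[Tuple[int, int]]:
--     """Parst Spaltenpositionen aus einer Separator-Zeile."""
--     columns = []
--     current_start = 0
--
--     for i, char in enumerate(separator):
--         if char == ' ' and i > 0 and separator[i-1] == '=':
--             columns.append((current_start, i))
--             current_start = i + 1
--         elif i == len(separator) - 1:
--             columns.append((current_start, i + 1))
--
--     return columns
-- ===== SOURCE B (Python) =====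
-- def _parse_column_positions(separator):
--     """Parst Spaltenpositionen aus einer Separator-Zeile."""
--     n = len(separator)
--     boundaries = [i for i in range(n)
--                   if separator[i] == ' ' and i > 0 and separator[i - 1] == '=']
--     columns = []
--     start = 0
--     for b in boundaries:
--         columns.append((start, b))
--         start = b + 1
--     if n > 0 and (n - 1) not in boundaries:
--         columns.append((start, n))
--     return columns
-- ===== Notes on version B (the rewrite author's own statement) =====
-- stated objective: alternative
-- what changed: B first scans once to build the list of boundary indices (a space preceded by '='), then constructs the column tuples in a separate pairing pass and appends the trailing column only when the last index is not a boundary, instead of A's single enumerate loop that emits tuples inline with an elif on the last index.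
import Mathlib
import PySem

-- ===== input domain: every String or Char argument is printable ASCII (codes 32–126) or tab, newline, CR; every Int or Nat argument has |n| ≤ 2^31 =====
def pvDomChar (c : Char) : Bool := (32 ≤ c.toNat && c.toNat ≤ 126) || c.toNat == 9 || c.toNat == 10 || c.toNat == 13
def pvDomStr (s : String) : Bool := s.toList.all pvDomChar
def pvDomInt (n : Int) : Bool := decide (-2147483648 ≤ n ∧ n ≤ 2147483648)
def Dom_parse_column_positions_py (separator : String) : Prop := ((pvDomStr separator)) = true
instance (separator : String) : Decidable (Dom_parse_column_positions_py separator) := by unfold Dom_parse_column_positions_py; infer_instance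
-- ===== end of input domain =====

-- B builds the list of boundary indices first, then pairs consecutive boundaries in a
-- second pass (alternative decomposition, same O(n) cost).

-- ===== PORT A =====
-- A's loop: enumerate the characters, append a column at each '=',' ' boundary,
-- and at the last index append the trailing column (elif: only if no boundary fired there).
def pvAStep (l : List Char) (st : List (Int × Int) × Int) (p : Int × Char) : List (Int × Int) × Int :=
  if p.2 = ' ' ∧ p.1 > 0 ∧ PySem.List.pyGet? l (p.1 - 1) = some '=' then
    (st.1 ++ [(st.2, p.1)], p.1 + 1)
  else if p.1 = (l.length : Int) - 1 then
    (st.1 ++ [(st.2, p.1 + 1)], st.2)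
  else st

def parse_column_positions_py (separator : String) : List (Int × Int) :=
  let l := separator.toList
  ((PySem.List.enumerate l 0).foldl (pvAStep l) ([], 0)).1

-- ===== PORT B =====
-- B: boundary indices, then the pairing pass, then the optional trailing column.
def pvBnd (l : List Char) : List Int :=
  (PySem.List.pyRange 0 (l.length : Int) 1).filter
    (fun i => decide (PySem.List.pyGet? l i = some ' ' ∧ i > 0 ∧ PySem.List.pyGet? l (i - 1) = some '='))

def pvPair (st : List (Int × Int) × Int) (b : Int) : List (Int × Int) × Int :=
  (st.1 ++ [(st.2, b)], b + 1)

def parse_column_positions_py_alt (separator : String) : List (Int × Int) :=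
  let l := separator.toList
  let n : Int := l.length
  let bnd := pvBnd l
  let st := bnd.foldl pvPair ([], 0)
  if 0 < n ∧ (n - 1) ∉ bnd then st.1 ++ [(st.2, n)] else st.1

-- ===== PRECONDITION & SPEC =====
def Spec_parse_column_positions_py (separator : String) (out : List (Int × Int)) : Prop := out = parse_column_positions_py_alt separator
instance (separator : String) (out : List (Int × Int)) : Decidable (Spec_parse_column_positions_py separator out) := by unfold Spec_parse_column_positions_py; infer_instance

-- ===== CLAIM (what is proved, stated in full; the proofs are below) =====
def Claim_equal_parse_column_positions_py : Prop := ∀ (separator : String), Dom_parse_column_positions_py separator → Spec_parse_column_positions_py separator (parse_column_positions_py separator)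

-- ===== LEMMAS AND PROOFS =====

theorem pv_main (l : List Char) :
    ((PySem.List.enumerate l 0).foldl (pvAStep l) ([], 0)).1 =
    (let n : Int := l.length
     let bnd := pvBnd l
     let st := bnd.foldl pvPair ([], 0)
     if 0 < n ∧ (n - 1) ∉ bnd then st.1 ++ [(st.2, n)] else st.1) := by
  by_cases hl : l = []
  · subst hl; rfl
  · have hn : 0 < (l.length : Int) := by
      have := List.length_pos_iff.mpr hl; exact_mod_cast this
    have hcong : ∀ (st : List (Int × Int) × Int) (i : Int),
        i ∈ PySem.List.pyRange 0 (l.length : Int) 1 →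
        pvAStep l st (i, PySem.List.pyGetD l i ' ') =
          (if PySem.List.pyGet? l i = some ' ' ∧ i > 0 ∧ PySem.List.pyGet? l (i - 1) = some '=' then
            pvPair st i
          else if i = (l.length : Int) - 1 then (st.1 ++ [(st.2, i + 1)], st.2) else st) := by
      intro st i hi
      rw [PySem.List.mem_pyRange_one] at hi
      have hlt : i < (l.length : Int) := by simpa using hi.2
      have h1 : PySem.List.pyGet? l i = some l[i.toNat] :=
        PySem.List.pyGet?_eq_some_getElem l hi.1 hlt
      have h2 : PySem.List.pyGetD l i ' ' = l[i.toNat] :=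
        PySem.List.pyGetD_eq_getElem l ' ' hi.1 hlt
      simp only [pvAStep, pvPair, h1, h2, Option.some.injEq]
    rw [PySem.List.enumerate_eq_map_pyRange (d := ' '), List.foldl_map]
    simp only [PySem.List.len_eq]
    rw [PySem.List.foldl_congr_mem _ _ _ _ hcong]
    have hsplit : PySem.List.pyRange 0 (l.length : Int) 1 =
        PySem.List.pyRange 0 ((l.length : Int) - 1) 1 ++ [(l.length : Int) - 1] := by
      have h := PySem.List.pyRange_one_succ_right (a := 0) (b := (l.length : Int) - 1) (by omega)
      have he : (l.length : Int) - 1 + 1 = (l.length : Int) := by omega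
      rw [he] at h; exact h
    have hcong2 : ∀ (st : List (Int × Int) × Int) (i : Int),
        i ∈ PySem.List.pyRange 0 ((l.length : Int) - 1) 1 →
        (if PySem.List.pyGet? l i = some ' ' ∧ i > 0 ∧ PySem.List.pyGet? l (i - 1) = some '=' then
            pvPair st i
          else if i = (l.length : Int) - 1 then (st.1 ++ [(st.2, i + 1)], st.2) else st) =
        (if PySem.List.pyGet? l i = some ' ' ∧ i > 0 ∧ PySem.List.pyGet? l (i - 1) = some '=' then
            pvPair st i
          else st) := by
      intro st i hi
      rw [PySem.List.mem_pyRange_one] at hi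
      have : i ≠ (l.length : Int) - 1 := by omega
      simp [this]
    unfold pvBnd
    rw [hsplit, List.foldl_append, List.filter_append,
        PySem.List.foldl_congr_mem _ _ _ _ hcong2, PySem.List.foldl_ite_eq_foldl_filter]
    by_cases hP : PySem.List.pyGet? l ((l.length : Int) - 1) = some ' ' ∧
        ((l.length : Int) - 1) > 0 ∧
        PySem.List.pyGet? l ((l.length : Int) - 1 - 1) = some '='
    · have hdec : decide (PySem.List.pyGet? l ((l.length : Int) - 1) = some ' ' ∧
          ((l.length : Int) - 1) > 0 ∧
          PySem.List.pyGet? l ((l.length : Int) - 1 - 1) = some '=') = true := decide_eq_true hP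
      rw [List.filter_cons, List.filter_nil, if_pos hdec]
      rw [List.foldl_append, List.foldl_cons, List.foldl_nil, List.foldl_cons, List.foldl_nil]
      rw [if_pos hP, if_neg (by simp)]
    · have hnm : ((l.length : Int) - 1) ∉
          (PySem.List.pyRange 0 ((l.length : Int) - 1) 1).filter
            (fun i => decide (PySem.List.pyGet? l i = some ' ' ∧ i > 0 ∧
              PySem.List.pyGet? l (i - 1) = some '=')) := by
        intro hmem
        have := (List.mem_filter.mp hmem).1
        rw [PySem.List.mem_pyRange_one] at this
        omega
      have he : (l.length : Int) - 1 + 1 = (l.length : Int) := by omega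
      have hdec : decide (PySem.List.pyGet? l ((l.length : Int) - 1) = some ' ' ∧
          ((l.length : Int) - 1) > 0 ∧
          PySem.List.pyGet? l ((l.length : Int) - 1 - 1) = some '=') = false := decide_eq_false hP
      have hcond : ¬ (decide (PySem.List.pyGet? l ((l.length : Int) - 1) = some ' ' ∧
          ((l.length : Int) - 1) > 0 ∧
          PySem.List.pyGet? l ((l.length : Int) - 1 - 1) = some '=') = true) := by
        simp only [decide_eq_true_eq]
        exact hP
      rw [List.filter_cons, List.filter_nil, if_neg hcond, List.append_nil]
      rw [List.foldl_cons, List.foldl_nil]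
      rw [if_neg hP, if_pos rfl, if_pos ⟨hn, hnm⟩]
      dsimp only
      rw [he]

-- ===== VERDICT (by name: the statement is the Claim_ definition above) =====
theorem parse_column_positions_py_spec : Claim_equal_parse_column_positions_py := by
  intro s _
  unfold Spec_parse_column_positions_py parse_column_positions_py parse_column_positions_py_alt
  exact pv_main s.toList
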